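-- pv_equiv track=rewrite | github.com/BlackDovah/My_Bioinformatics_Journey | Course/Antibiotics.py | sub_peptide_generator_CYCLIC
-- ===== SOURCE A (Python) =====
-- def sub_peptide_generator_CYCLIC(Peptide):
--     subPeptides = []
--     extendedDNA = Peptide + Peptide[:len(Peptide)-2]
--
--     for ind in range(len(Peptide)):
--         for inc in range(1, len(Peptide)):
--             subPeptides.append(extendedDNA[ind:ind+inc])
--     subPeptides.sort(key=len)
--     return subPeptides
-- ===== SOURCE B (Python) =====
-- def sub_peptide_generator_CYCLIC(Peptide):
--     n = len(Peptide)
--     out = []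
--     cur = list(Peptide)  # the n length-1 subpeptides, one per start position
--     for L in range(1, n):
--         out.extend(cur)
--         cur = [cur[i] + Peptide[(i + L) % n] for i in range(n)]
--     return out
-- ===== Notes on version B (the rewrite author's own statement) =====
-- stated objective: alternative
-- what changed: B builds the subpeptides by dynamic extension: it keeps one growing subpeptide per start position and each round emits the current row and appends the next cyclic character to every entry, so A's extended slicing buffer, the n^2 substring slices and the stable sort all disappear.
import Mathlib
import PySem

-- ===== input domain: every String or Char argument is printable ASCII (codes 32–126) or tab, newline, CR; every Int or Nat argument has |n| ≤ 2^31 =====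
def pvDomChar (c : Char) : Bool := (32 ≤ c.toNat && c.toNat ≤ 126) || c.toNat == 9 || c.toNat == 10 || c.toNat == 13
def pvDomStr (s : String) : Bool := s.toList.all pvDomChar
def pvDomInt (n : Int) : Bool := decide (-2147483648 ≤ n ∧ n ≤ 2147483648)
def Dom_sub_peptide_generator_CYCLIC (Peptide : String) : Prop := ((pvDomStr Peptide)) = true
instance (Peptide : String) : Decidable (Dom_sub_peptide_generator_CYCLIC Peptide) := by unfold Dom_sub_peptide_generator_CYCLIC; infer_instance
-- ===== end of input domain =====

-- B replaces A's slice-everything-then-stable-sort by dynamic extension: it keeps one growing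
-- subpeptide per start position, each round emitting the current row and appending the next
-- cyclic character to every entry — no extended buffer, no slicing, no sort.

-- ===== PORT A =====
def sub_peptide_generator_CYCLIC (Peptide : String) : List String :=
  let p := Peptide.toList
  let subPeptides : List String := []
  let extendedDNA := p ++ PySem.List.slice p none (some (PySem.Str.len Peptide - 2))
  let subPeptides := (PySem.List.pyRange 0 (PySem.Str.len Peptide) 1).foldl (fun acc ind =>
      (PySem.List.pyRange 1 (PySem.Str.len Peptide) 1).foldl (fun acc2 inc =>
        acc2 ++ [String.ofList (PySem.List.slice extendedDNA (some ind) (some (ind + inc)))]) acc) subPeptides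
  PySem.List.sorted subPeptides (fun s => PySem.Str.len s) false

-- ===== PORT B =====
-- out/cur as a pair-state fold over L = 1..n-1; all indices are provably in range, so getD is
-- exact for Python's indexing, and Python's (i + L) % n on nonnegative operands is Nat mod.
def sub_peptide_generator_CYCLIC_alt (Peptide : String) : List String :=
  let p := Peptide.toList
  let st := (PySem.List.pyRange 1 (PySem.Str.len Peptide) 1).foldl
    (fun (st : List String × List String) L =>
      (st.1 ++ st.2,
        (List.range p.length).map (fun i =>
          st.2.getD i "" ++ String.ofList [p.getD ((i + L.toNat) % p.length) ' '])))
    ([], p.map (fun c => String.ofList [c]))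
  st.1

-- ===== PRECONDITION & SPEC =====
def Spec_sub_peptide_generator_CYCLIC (Peptide : String) (out : List String) : Prop := out = sub_peptide_generator_CYCLIC_alt Peptide
instance (Peptide : String) (out : List String) : Decidable (Spec_sub_peptide_generator_CYCLIC Peptide out) := by unfold Spec_sub_peptide_generator_CYCLIC; infer_instance

-- ===== CLAIM (what is proved, stated in full; the proofs are below) =====
def Claim_equal_sub_peptide_generator_CYCLIC : Prop := ∀ (Peptide : String), Dom_sub_peptide_generator_CYCLIC Peptide → Spec_sub_peptide_generator_CYCLIC Peptide (sub_peptide_generator_CYCLIC Peptide)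

-- ===== LEMMAS AND PROOFS =====

-- A's extended buffer, the cyclic substring pvF i j (start i, length j+1), the row of all n
-- subpeptides of one length, and the grouped target pvT f m i0 = [f i j | j < m, i < i0]
-- in length-major order (= the order B emits).
def pvExt (p : List Char) : List Char := p ++ p.take (p.length - 2)
def pvF (p : List Char) (i j : ℕ) : String := String.ofList (((pvExt p).drop i).take (j + 1))
def pvRow (p : List Char) (r : ℕ) : List String := (List.range p.length).map (fun i => pvF p i r)
def pvT {α : Type} (f : ℕ → ℕ → α) (m i0 : ℕ) : List α :=
  (List.range m).flatMap (fun j => (List.range i0).map (fun i => f i j))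

-- a nested append-only double loop is a flatMap of maps
theorem pv_nested_foldl {α γ δ : Type} (outer : List γ) (inner : γ → List δ)
    (g : γ → δ → α) (acc : List α) :
    outer.foldl (fun a x => (inner x).foldl (fun a2 y => a2 ++ [g x y]) a) acc
      = acc ++ outer.flatMap (fun x => (inner x).map (g x)) := by
  induction outer generalizing acc with
  | nil => simp
  | cons x xs ih =>
    rw [List.foldl_cons, PySem.List.foldl_append_singleton_eq_map, ih, List.flatMap_cons,
      List.append_assoc]

-- stable insertion: x goes after every key ≤ key x and before every key > key x
theorem pv_ins_mid {α : Type} (key : α → Int) (x : α) (A B : List α)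
    (hA : ∀ a ∈ A, key a ≤ key x) (hB : ∀ b ∈ B, key x < key b) :
    PySem.List.insertBy (fun a b => decide (key a < key b)) x (A ++ B) = A ++ x :: B := by
  induction A with
  | nil =>
    cases B with
    | nil => simp [PySem.List.insertBy]
    | cons b B' =>
      have := hB b (by simp)
      simp [PySem.List.insertBy, this]
  | cons a A' ih =>
    have ha : ¬ (key x < key a) := not_lt.mpr (hA a (by simp))
    simpa [PySem.List.insertBy, ha] using ih (fun a' h => hA a' (by simp [h]))

-- folding one row (keys 1..m, increasing) into the grouped accumulator extends every group by one
theorem pv_fold_row {α : Type} (f : ℕ → ℕ → α) (key : α → Int) (N M : ℕ)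
    (hkey : ∀ i j, i < N → j < M → key (f i j) = (j : Int) + 1)
    (i : ℕ) (hi : i < N) :
    ∀ (m : ℕ), m ≤ M → ∀ (Z : List α), (∀ z ∈ Z, (m : Int) < key z) →
    ((List.range m).map (f i)).foldl
        (fun acc x => PySem.List.insertBy (fun a b => decide (key a < key b)) x acc)
        (pvT f m i ++ Z)
      = pvT f m (i + 1) ++ Z := by
  intro m
  induction m with
  | zero => intro _ Z _; simp [pvT]
  | succ m ih =>
    intro hm Z hZ
    have hmM : m ≤ M := by omega
    have hT : ∀ i0, i0 ≤ N → ∀ x ∈ pvT f m i0, key x ≤ (m : Int) := by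
      intro i0 hi0 x hx
      simp only [pvT, List.mem_flatMap, List.mem_map, List.mem_range] at hx
      obtain ⟨j, hj, i', hi', rfl⟩ := hx
      rw [hkey i' j (by omega) (by omega)]
      omega
    have hsplit : pvT f (m + 1) i = pvT f m i ++ (List.range i).map (fun i' => f i' m) := by
      simp [pvT, List.range_succ]
    have hsplit' : pvT f (m + 1) (i + 1)
        = pvT f m (i + 1) ++ ((List.range i).map (fun i' => f i' m) ++ [f i m]) := by
      simp [pvT, List.range_succ]
    rw [List.range_succ, List.map_append, List.foldl_append, hsplit, List.append_assoc]
    rw [ih hmM ((List.range i).map (fun i' => f i' m) ++ Z) ?side1]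
    case side1 =>
      intro z hz
      rcases List.mem_append.mp hz with h | h
      · simp only [List.mem_map, List.mem_range] at h
        obtain ⟨i', hi', rfl⟩ := h
        rw [hkey i' m (by omega) (by omega)]; omega
      · have := hZ z h; omega
    simp only [List.map_cons, List.map_nil, List.foldl_cons, List.foldl_nil]
    rw [← List.append_assoc, pv_ins_mid key (f i m) _ Z ?side2 ?side3]
    · rw [hsplit', List.append_assoc, List.append_assoc]
      simp
    case side2 =>
      intro a ha
      rw [hkey i m hi (by omega)]
      rcases List.mem_append.mp ha with h | h
      · exact le_trans (hT (i + 1) (by omega) a h) (by omega)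
      · simp only [List.mem_map, List.mem_range] at h
        obtain ⟨i', hi', rfl⟩ := h
        rw [hkey i' m (by omega) (by omega)]
    case side3 =>
      intro b hb
      rw [hkey i m hi (by omega)]
      exact hZ b hb

-- insertion-sorting the row-major list yields the grouped length-major list
theorem pv_sort_rows {α : Type} (f : ℕ → ℕ → α) (key : α → Int) (N M : ℕ)
    (hkey : ∀ i j, i < N → j < M → key (f i j) = (j : Int) + 1) :
    ∀ i0, i0 ≤ N →
    ((List.range i0).flatMap (fun i => (List.range M).map (f i))).foldl
        (fun acc x => PySem.List.insertBy (fun a b => decide (key a < key b)) x acc) []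
      = pvT f M i0 := by
  intro i0
  induction i0 with
  | zero => intro _; simp [pvT]
  | succ i ih =>
    intro hi
    rw [List.range_succ, List.flatMap_append, List.foldl_append, ih (by omega)]
    simpa using pv_fold_row f key N M hkey i (by omega) M le_rfl [] (by simp)

theorem pv_ext_length (p : List Char) (h : 2 ≤ p.length) :
    (pvExt p).length = p.length + (p.length - 2) := by
  simp only [pvExt, List.length_append, List.length_take]; omega

theorem pv_len_F (p : List Char) (i j : ℕ) (hi : i < p.length) (hj : j < p.length - 1) :
    PySem.Str.len (pvF p i j) = (j : Int) + 1 := by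
  have hn : 2 ≤ p.length := by omega
  have hlen := pv_ext_length p hn
  rw [pvF, PySem.Str.len_eq]
  have : (((pvExt p).drop i).take (j + 1)).length = j + 1 := by
    simp only [List.length_take, List.length_drop, hlen]
    omega
  simp [this]

-- A's slice of the extended buffer at (i, i+j+1) is pvF i j
theorem pv_sliceF (p : List Char) (i j : ℕ) :
    String.ofList (PySem.List.slice (pvExt p)
        (some ((0 : Int) + (i : ℕ))) (some (((0 : Int) + (i : ℕ)) + (1 + (j : ℕ)))))
      = pvF p i j := by
  rw [show ((0 : Int) + (i : ℕ)) = ((i : ℕ) : Int) by omega,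
    show ((i : ℕ) : Int) + (1 + (j : ℕ)) = ((i : ℕ) : Int) + ((j + 1 : ℕ) : Int) by push_cast; ring,
    PySem.List.slice_natCast_add]
  rfl

-- characters of the extended buffer read cyclically from p
theorem pv_ext_getD (p : List Char) (h2 : 2 ≤ p.length) (k : ℕ)
    (hk : k < p.length + (p.length - 2)) (d : Char) :
    (pvExt p).getD k d = p.getD (k % p.length) d := by
  rcases Nat.lt_or_ge k p.length with h | h
  · rw [Nat.mod_eq_of_lt h]
    simp only [pvExt, List.getD, List.getElem?_append_left h]
  · have hmod : k % p.length = k - p.length := by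
      rw [Nat.mod_eq_sub_mod h, Nat.mod_eq_of_lt (by omega)]
    rw [hmod]
    simp only [pvExt, List.getD, List.getElem?_append_right h,
      List.getElem?_take_of_lt (show k - p.length < p.length - 2 by omega)]

-- appending the next cyclic character extends pvF by one
theorem pv_F_succ (p : List Char) (i r : ℕ) (hi : i < p.length) (hr : r + 1 ≤ p.length - 2) :
    pvF p i (r + 1) = pvF p i r ++ String.ofList [p.getD ((i + (r + 1)) % p.length) ' '] := by
  have h2 : 2 ≤ p.length := by omega
  have hlen := pv_ext_length p h2
  have hk : i + (r + 1) < (pvExt p).length := by omega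
  have hdrop : r + 1 < ((pvExt p).drop i).length := by simp [List.length_drop]; omega
  rw [pvF, pvF, List.take_add_one, List.getElem?_drop,
    List.getElem?_eq_getElem (by omega), Option.toList_some]
  rw [String.ofList_append]
  congr 3
  rw [← List.getD_eq_getElem (pvExt p) ' ' (by omega),
    pv_ext_getD p h2 (i + (r + 1)) (by omega) ' ']

-- the initial cur (one character per start position) is row 0
theorem pv_row0 (p : List Char) (h2 : 2 ≤ p.length) :
    p.map (fun c => String.ofList [c]) = pvRow p 0 := by
  apply List.ext_getElem
  · simp [pvRow]
  · intro i hi1 hi2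
    simp only [List.length_map] at hi1
    simp only [pvRow, List.getElem_map, List.getElem_range]
    rw [pvF, show (0 + 1) = 1 from rfl]
    have hk : i < (pvExt p).length := by rw [pv_ext_length p h2]; omega
    rw [List.take_add_one, List.take_zero, List.nil_append, List.getElem?_drop,
      List.getElem?_eq_getElem (by omega), Option.toList_some]
    congr 2
    rw [← List.getD_eq_getElem (pvExt p) ' ' (by omega),
      pv_ext_getD p h2 (i + 0) (by omega) ' ',
      Nat.add_zero, Nat.mod_eq_of_lt hi1, List.getD_eq_getElem p ' ' hi1]

-- loop invariant of B: after r rounds, out is the grouped list of the first r lengths and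
-- (as long as another round follows) cur is the row of length r+1
theorem pv_B_inv (p : List Char) (h2 : 2 ≤ p.length) :
    ∀ r, r ≤ p.length - 1 →
    ((List.range r).foldl
        (fun (st : List String × List String) k =>
          (st.1 ++ st.2,
            (List.range p.length).map (fun i =>
              st.2.getD i "" ++ String.ofList [p.getD ((i + (k + 1)) % p.length) ' '])))
        ([], p.map (fun c => String.ofList [c]))).1 = pvT (pvF p) r p.length
      ∧ (r ≤ p.length - 2 →
        ((List.range r).foldl
            (fun (st : List String × List String) k =>
              (st.1 ++ st.2,
                (List.range p.length).map (fun i =>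
                  st.2.getD i "" ++ String.ofList [p.getD ((i + (k + 1)) % p.length) ' '])))
            ([], p.map (fun c => String.ofList [c]))).2 = pvRow p r) := by
  intro r
  induction r with
  | zero =>
    intro _
    constructor
    · simp [pvT]
    · intro _; simpa using pv_row0 p h2
  | succ r ih =>
    intro hr
    obtain ⟨ih1, ih2⟩ := ih (by omega)
    have hcur := ih2 (by omega)
    rw [List.range_succ, List.foldl_append, List.foldl_cons, List.foldl_nil]
    constructor
    · simp only [ih1, hcur]
      simp [pvT, pvRow, List.range_succ]
    · intro hr2
      simp only [hcur, pvRow]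
      apply List.map_congr_left
      intro i hi
      rw [List.mem_range] at hi
      rw [show (((List.range p.length).map (fun i => pvF p i r)).getD i "") = pvF p i r from
        PySem.List.getD_map_range _ _ _ _ hi]
      exact (pv_F_succ p i r hi (by omega)).symm

-- normal form of port A: the insertBy fold (= stable sort) of the row-major list of pvF's
theorem pv_A_norm (P : String) :
    sub_peptide_generator_CYCLIC P =
      ((List.range P.toList.length).flatMap
          (fun i => (List.range (P.toList.length - 1)).map (fun j => pvF P.toList i j))).foldl
        (fun acc x => PySem.List.insertBy
          (fun a b => decide (PySem.Str.len a < PySem.Str.len b)) x acc) [] := by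
  rw [sub_peptide_generator_CYCLIC]
  set p := P.toList with hp
  set n := p.length with hnn
  have hext : p ++ PySem.List.slice p none (some (PySem.Str.len P - 2)) = pvExt p := by
    rw [pvExt, PySem.Str.len_eq, ← hp, ← hnn]
    congr 1
    rcases Nat.lt_or_ge n 2 with h | h
    · rw [show ((n : Int) - 2) = -(((2 - n : ℕ)) : Int) by omega,
        PySem.List.slice_to_neg_natCast p (2 - n) (by omega), ← hnn,
        show n - (2 - n) = 0 by omega, show n - 2 = 0 by omega]
    · rw [show (n : Int) - 2 = ((n - 2 : ℕ) : Int) by omega, PySem.List.slice_to_natCast]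
  rw [hext, PySem.Str.len_eq, ← hp, ← hnn]
  rw [PySem.List.sorted_eq_foldl_insertBy]
  congr 1
  rw [PySem.List.pyRange_one, PySem.List.pyRange_one]
  rw [show ((n : Int) - 0).toNat = n by omega, show ((n : Int) - 1).toNat = n - 1 by omega]
  rw [List.foldl_map, pv_nested_foldl
    (g := fun (i : ℕ) (inc : Int) =>
      String.ofList (PySem.List.slice (pvExt p) (some ((0 : Int) + (i : ℕ))) (some (((0 : Int) + (i : ℕ)) + inc))))]
  rw [List.nil_append]
  rw [List.flatMap_def, List.flatMap_def]
  apply congrArg List.flatten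
  apply List.map_congr_left
  intro i _
  rw [List.map_map]
  apply List.map_congr_left
  intro j _
  exact pv_sliceF p i j

-- normal form of port B: the grouped length-major list, via the loop invariant
theorem pv_B_norm (P : String) :
    sub_peptide_generator_CYCLIC_alt P
      = pvT (pvF P.toList) (P.toList.length - 1) P.toList.length := by
  rw [sub_peptide_generator_CYCLIC_alt]
  set p := P.toList with hp
  set n := p.length with hnn
  rw [PySem.Str.len_eq, ← hp, ← hnn]
  rw [PySem.List.pyRange_one 1 (n : ℕ)]
  rw [show ((n : Int) - 1).toNat = n - 1 by omega]
  rw [List.foldl_map]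
  simp only [show ∀ k : ℕ, ((1 : Int) + (k : ℕ)).toNat = k + 1 from fun k => by omega]
  rcases Nat.lt_or_ge n 2 with h | h
  · rw [show n - 1 = 0 by omega]
    simp [pvT]
  · exact (pv_B_inv p (by omega) (n - 1) le_rfl).1

-- ===== VERDICT (by name: the statement is the Claim_ definition above) =====
theorem sub_peptide_generator_CYCLIC_spec : Claim_equal_sub_peptide_generator_CYCLIC := by
  intro P _
  show sub_peptide_generator_CYCLIC P = sub_peptide_generator_CYCLIC_alt P
  rw [pv_A_norm, pv_B_norm]
  exact pv_sort_rows (pvF P.toList) (fun s => PySem.Str.len s)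
    P.toList.length (P.toList.length - 1)
    (fun i j hi hj => pv_len_F P.toList i j hi hj) P.toList.length le_rfl
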